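-- pv_equiv track=rewrite | github.com/Mamdasn/telegram-bot-protests-in-berlin | telegrambot/libs/tools_collection.py | message_format_for_postgres
-- ===== SOURCE A (Python) =====
-- def message_format_for_postgres(queries, page_number=1, length_of_message=3000):
--     """
--     Format a list of queries for display, splitting into pages if necessary.
--
--     :param queries: A list of SQL queries.
--     :type queries: list[str]
--     :param page_number: The page number to display, defaults to 1.
--     :type page_number: int, optional
--     :param length_of_message: The maximum length of the message, defaults to 3000.
--     :type length_of_message: int, optional
--     :return: A tuple containing the formatted page of queries and the total number of pages.
--     :rtype: (str, int)
--     """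
--     queries = [f"{q}\n" for q in queries]
--     queries_len = [len(q) for q in queries]
--     query_indexes_for_current_page = [[]]
--     number_of_pages = 1
--     for i, ql in enumerate(queries_len):
--         length_of_current_page = sum(
--             [queries_len[qicp] for qicp in query_indexes_for_current_page[-1]]
--         )
--         if length_of_current_page + ql > length_of_message:
--             if i == 0:
--                 break
--             number_of_pages += 1
--             query_indexes_for_current_page.append([])
--
--         query_indexes_for_current_page[-1].append(i)
--
--     page = (
--         "".join([queries[i] for i in query_indexes_for_current_page[page_number - 1]])
--         if page_number <= number_of_pages
--         else ""
--     )
--     return page, number_of_pages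
-- ===== SOURCE B (Python) =====
-- def message_format_for_postgres(queries, page_number=1, length_of_message=3000):
--     """Single pass: build pages directly, keeping a running length of the
--     current page instead of re-summing index lists each iteration."""
--     pages = [""]
--     current_length = 0
--     for i, q in enumerate(queries):
--         l = len(q) + 1
--         if current_length + l > length_of_message:
--             if i == 0:
--                 break
--             pages.append("")
--             current_length = 0
--         pages[-1] += q + "\n"
--         current_length += l
--     number_of_pages = len(pages)
--     page = pages[page_number - 1] if 1 <= page_number <= number_of_pages else ""
--     return page, number_of_pages
-- ===== Notes on version B (the rewrite author's own statement) =====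
-- stated objective: alternative
-- what changed: B replaces A's list-of-index-lists with a direct list of page strings and a running current-page length, eliminating the per-iteration re-summation of the current page's query lengths (O(n^2) -> O(n)); nonpositive page numbers (outside the natural domain) are excluded by Pre_.
-- outside the precondition, e.g. on message_format_for_postgres(['a'], 0, 3000): A returns ('a\n', 1), B returns ('', 1); on message_format_for_postgres(['a'], -5, 3000): A raises IndexError, B returns ('', 1)
import Mathlib
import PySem

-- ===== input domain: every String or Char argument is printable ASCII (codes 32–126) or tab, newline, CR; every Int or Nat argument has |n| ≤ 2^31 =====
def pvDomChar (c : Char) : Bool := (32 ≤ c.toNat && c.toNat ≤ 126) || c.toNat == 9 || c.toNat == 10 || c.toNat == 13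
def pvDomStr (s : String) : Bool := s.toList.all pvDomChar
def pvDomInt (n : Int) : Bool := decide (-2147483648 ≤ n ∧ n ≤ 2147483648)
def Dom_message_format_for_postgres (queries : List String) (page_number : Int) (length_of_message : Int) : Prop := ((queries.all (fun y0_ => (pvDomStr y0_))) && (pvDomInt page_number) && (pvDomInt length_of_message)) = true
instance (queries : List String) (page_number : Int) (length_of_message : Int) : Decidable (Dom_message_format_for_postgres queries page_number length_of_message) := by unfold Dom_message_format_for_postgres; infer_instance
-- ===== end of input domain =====

-- B paginates in one pass with a running current-page length instead of A's list-of-index-lists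
-- with per-iteration re-summation, O(n^2) -> O(n) (objective: alternative, single pass). Pre_ excludes page_number ≤ 0 (outside the
-- natural page-number domain), where A raises IndexError or selects a page by negative-index wraparound.


-- ===== PORT A =====
-- Python's query_indexes_for_current_page is kept as `fin ++ [cur]`: `cur` is the mutable last
-- sub-list qicp[-1], `fin` the finished ones.  `break` (reachable only at i == 0) returns directly.
def pvA_loop (qlen : List Int) (L : Int) :
    List (Int × Int) → List (List Int) → List Int → Int → List (List Int) × Int
  | [], fin, cur, n => (fin ++ [cur], n)
  | (i, ql) :: rest, fin, cur, n =>
    let lcp := (cur.map (fun j => PySem.List.pyGetD qlen j 0)).sum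
    if lcp + ql > L then
      if i = 0 then (fin ++ [cur], n)
      else pvA_loop qlen L rest (fin ++ [cur]) [i] (n + 1)
    else pvA_loop qlen L rest fin (cur ++ [i]) n

def message_format_for_postgres (queries : List String) (page_number : Int) (length_of_message : Int) : String × Int :=
  let queries' := queries.map (fun q => q ++ "\n")
  let qlen := queries'.map (fun q => PySem.Str.len q)
  let r := pvA_loop qlen length_of_message (PySem.List.enumerate qlen 0) [] [] 1
  let page :=
    if page_number ≤ r.2 then
      -- the indices stored in r.1 are always in range, so the defaulted lookups are exact
      PySem.Str.join "" ((PySem.List.pyGetD r.1 (page_number - 1) []).map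
        (fun i => PySem.List.pyGetD queries' i ""))
    else ""
  (page, r.2)

-- ===== PORT B =====
-- `fin ++ [cp]` is Python's `pages` (cp the mutable last page), `cl` the running current length.
def pvB_loop (L : Int) : List (Int × String) → List String → String → Int → List String
  | [], fin, cp, _ => fin ++ [cp]
  | (i, q) :: rest, fin, cp, cl =>
    let l := PySem.Str.len q + 1
    if cl + l > L then
      if i = 0 then fin ++ [cp]
      else pvB_loop L rest (fin ++ [cp]) (q ++ "\n") l
    else pvB_loop L rest fin (cp ++ q ++ "\n") (cl + l)

def message_format_for_postgres_alt (queries : List String) (page_number : Int) (length_of_message : Int) : String × Int :=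
  let pages := pvB_loop length_of_message (PySem.List.enumerate queries 0) [] "" 0
  let n := PySem.List.len pages
  let page := if 1 ≤ page_number ∧ page_number ≤ n then PySem.List.pyGetD pages (page_number - 1) "" else ""
  (page, n)

-- ===== PRECONDITION & SPEC =====
-- Pre_ excludes page_number ≤ 0 (outside the natural page-number domain): there A either raises
-- IndexError (page_number - 1 below -number_of_pages) or returns a page picked by Python's
-- accidental negative-index wraparound; B returns the empty page there.
def Pre_message_format_for_postgres (queries : List String) (page_number : Int) (length_of_message : Int) : Prop := 1 ≤ page_number
instance (queries : List String) (page_number : Int) (length_of_message : Int) : Decidable (Pre_message_format_for_postgres queries page_number length_of_message) := by unfold Pre_message_format_for_postgres; infer_instance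
def pvWitness_message_format_for_postgres : List String × Int × Int := (["a"], 1, 3000)

def Spec_message_format_for_postgres (queries : List String) (page_number : Int) (length_of_message : Int) (out : String × Int) : Prop := out = message_format_for_postgres_alt queries page_number length_of_message
instance (queries : List String) (page_number : Int) (length_of_message : Int) (out : String × Int) : Decidable (Spec_message_format_for_postgres queries page_number length_of_message out) := by unfold Spec_message_format_for_postgres; infer_instance

-- ===== CLAIM (what is proved, stated in full; the proofs are below) =====
def Claim_equal_message_format_for_postgres : Prop := ∀ (queries : List String) (page_number : Int) (length_of_message : Int), Dom_message_format_for_postgres queries page_number length_of_message → Pre_message_format_for_postgres queries page_number length_of_message → Spec_message_format_for_postgres queries page_number length_of_message (message_format_for_postgres queries page_number length_of_message)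

-- ===== LEMMAS AND PROOFS =====

-- the string a list of stored indices renders to (what Port A's final join computes)
def pvRender (queries : List String) (idxs : List Int) : String :=
  PySem.Str.join "" (idxs.map (fun i => PySem.List.pyGetD (queries.map (fun q => q ++ "\n")) i ""))

lemma pvChars_join_append (l : List (List Char)) (x : List Char) :
    PySem.Chars.join [] (l ++ [x]) = PySem.Chars.join [] l ++ x := by
  induction l with
  | nil => simp [PySem.Chars.join_nil, PySem.Chars.join_singleton]
  | cons a t ih =>
    cases t with
    | nil => simp [PySem.Chars.join_singleton, PySem.Chars.join_cons_cons]
    | cons b t2 => simp_all [PySem.Chars.join_cons_cons]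

lemma pvJoin_singleton (x : String) : PySem.Str.join "" [x] = x :=
  String.toList_inj.mp (by simp [PySem.Str.toList_join, PySem.Chars.join_singleton])

lemma pvJoin_append (l : List String) (x : String) :
    PySem.Str.join "" (l ++ [x]) = PySem.Str.join "" l ++ x :=
  String.toList_inj.mp (by simp [PySem.Str.toList_join, pvChars_join_append])

lemma pvRender_append (queries : List String) (idxs : List Int) (i : Int) :
    pvRender queries (idxs ++ [i]) =
      pvRender queries idxs ++ PySem.List.pyGetD (queries.map (fun q => q ++ "\n")) i "" := by
  simp [pvRender, pvJoin_append]

lemma pvRender_nil (queries : List String) : pvRender queries [] = "" :=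
  String.toList_inj.mp (by simp [pvRender, PySem.Str.toList_join, PySem.Chars.join_nil])

lemma pvRender_singleton (queries : List String) (i : Int) :
    pvRender queries [i] = PySem.List.pyGetD (queries.map (fun q => q ++ "\n")) i "" := by
  simp [pvRender, pvJoin_singleton]

-- lookup of the element at position pre.length of the mapped list
lemma pvGetD_map_mid {α β : Type} (f : α → β) (pre : List α) (q : α) (rest : List α) (d : β) :
    PySem.List.pyGetD ((pre ++ q :: rest).map f) ((pre.length : Int)) d = f q := by
  rw [PySem.List.pyGetD_natCast]
  simp [List.getD]

-- main loop invariant: B's loop state is the rendering of A's loop state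
lemma pv_loop_eq (queries : List String) (L : Int) :
    ∀ (s pre : List String) (finA : List (List Int)) (curA : List Int) (n : Int)
      (finB : List String) (cp : String) (cl : Int),
    queries = pre ++ s →
    finA.map (pvRender queries) = finB →
    pvRender queries curA = cp →
    (curA.map (fun j => PySem.List.pyGetD ((queries.map (fun q => q ++ "\n")).map (fun q => PySem.Str.len q)) j 0)).sum = cl →
    n = (finB.length : Int) + 1 →
    (pvA_loop ((queries.map (fun q => q ++ "\n")).map (fun q => PySem.Str.len q)) L
        (PySem.List.enumerate (s.map (fun q => PySem.Str.len (q ++ "\n"))) (pre.length)) finA curA n).1.map (pvRender queries)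
      = pvB_loop L (PySem.List.enumerate s (pre.length)) finB cp cl
    ∧ (pvA_loop ((queries.map (fun q => q ++ "\n")).map (fun q => PySem.Str.len q)) L
        (PySem.List.enumerate (s.map (fun q => PySem.Str.len (q ++ "\n"))) (pre.length)) finA curA n).2
      = ((pvB_loop L (PySem.List.enumerate s (pre.length)) finB cp cl).length : Int) := by
  intro s
  induction s with
  | nil =>
    intro pre finA curA n finB cp cl hq h1 h2 h3 h4
    simp [pvA_loop, pvB_loop, PySem.List.enumerate, ← h1, h2, h4]
  | cons q rest ih =>
    intro pre finA curA n finB cp cl hq h1 h2 h3 h4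
    rw [List.map_cons, PySem.List.enumerate_cons, PySem.List.enumerate_cons]
    have hlen : PySem.Str.len (q ++ "\n") = PySem.Str.len q + 1 := by
      rw [PySem.Str.len_append]
      have h : PySem.Str.len "\n" = 1 := by decide
      omega
    have hql : PySem.List.pyGetD ((queries.map (fun q => q ++ "\n")).map (fun q => PySem.Str.len q)) ((pre.length : Int)) 0
        = PySem.Str.len q + 1 := by
      rw [hq, List.map_map]
      exact (pvGetD_map_mid _ pre q rest 0).trans hlen
    have hq' : PySem.List.pyGetD (queries.map (fun x => x ++ "\n")) ((pre.length : Int)) "" = q ++ "\n" := by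
      rw [hq]; exact pvGetD_map_mid _ pre q rest ""
    have hpre : queries = (pre ++ [q]) ++ rest := by simpa using hq
    simp only [pvA_loop, pvB_loop, h3, hlen]
    split_ifs with hcond hzero
    · -- break: i == 0 in both loops
      simp [← h1, h2, h4]
    · -- condition fired at i ≠ 0: a new page starts with this query
      have := ih (pre ++ [q]) (finA ++ [curA]) [(pre.length : Int)] (n + 1)
        (finB ++ [cp]) (q ++ "\n") (PySem.Str.len q + 1) hpre
        (by simp [← h1, h2]) (by rw [pvRender_singleton, hq'])
        (by simp only [List.map_cons, List.map_nil, List.sum_cons, List.sum_nil, hql]; ring)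
        (by simp only [List.length_append, List.length_cons, List.length_nil, Nat.cast_add, Nat.cast_one]; omega)
      simpa using this
    · -- query fits on the current page
      have := ih (pre ++ [q]) finA (curA ++ [(pre.length : Int)]) n
        finB (cp ++ q ++ "\n") (cl + (PySem.Str.len q + 1)) hpre
        h1 (by rw [pvRender_append, h2, hq', String.append_assoc])
        (by simp only [List.map_append, List.map_cons, List.map_nil, List.sum_append, List.sum_cons, List.sum_nil, hql, h3]; ring)
        h4
      simpa using this

-- the page-selection tails of the two ports agree given the loop invariant
lemma pv_final (queries : List String) (pn : Int) (pagesA : List (List Int)) (nA : Int) (pagesB : List String)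
    (h1 : pagesA.map (pvRender queries) = pagesB) (h2 : nA = (pagesB.length : Int)) (hpre : (1:Int) ≤ pn) :
    ((if pn ≤ nA then
        PySem.Str.join "" ((PySem.List.pyGetD pagesA (pn - 1) []).map
          (fun i => PySem.List.pyGetD (queries.map (fun q => q ++ "\n")) i ""))
      else ""), nA)
    = ((if 1 ≤ pn ∧ pn ≤ PySem.List.len pagesB then PySem.List.pyGetD pagesB (pn - 1) "" else ""), PySem.List.len pagesB) := by
  have hlenB : PySem.List.len pagesB = (pagesB.length : Int) := PySem.List.len_eq pagesB
  subst h2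
  rw [Prod.mk.injEq]
  refine ⟨?_, by rw [hlenB]⟩
  by_cases hle : pn ≤ (pagesB.length : Int)
  · have hA : pagesA.length = pagesB.length := by rw [← h1, List.length_map]
    have h0 : (0:Int) ≤ pn - 1 := by omega
    have hlt : pn - 1 < (pagesA.length : Int) := by rw [hA]; omega
    have hlt' : pn - 1 < (pagesB.length : Int) := by omega
    rw [if_pos hle, if_pos ⟨hpre, by rw [hlenB]; exact hle⟩,
      PySem.List.pyGetD_eq_getElem pagesA ([] : List Int) h0 hlt,
      PySem.List.pyGetD_eq_getElem pagesB "" h0 hlt']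
    show pvRender queries _ = _
    simp only [← h1, List.getElem_map]
  · rw [if_neg hle, if_neg (by rw [hlenB]; tauto)]

-- ===== VERDICT (by name: the statement is the Claim_ definition above) =====
theorem message_format_for_postgres_spec : Claim_equal_message_format_for_postgres := by
  intro queries pn L _ hpre
  unfold Spec_message_format_for_postgres message_format_for_postgres message_format_for_postgres_alt
  have hmm : (queries.map (fun q => q ++ "\n")).map (fun q => PySem.Str.len q)
      = queries.map (fun q => PySem.Str.len (q ++ "\n")) := by rw [List.map_map]; rfl
  obtain ⟨h1, h2⟩ := pv_loop_eq queries L queries [] [] [] 1 [] "" 0 rfl rfl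
    (pvRender_nil queries) (by simp) (by simp)
  rw [← hmm] at h1 h2
  simp only [List.length_nil, Nat.cast_zero] at h1 h2
  exact pv_final queries pn _ _ _ h1 h2 hpre
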